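-- pv_equiv track=rewrite | github.com/wazuh/wazuh | tools/policy-migration/refactor_regex.py | _has_w_in_rn_tokens
-- ===== SOURCE A (Python) =====
-- from typing import List, Tuple, Set, Optional
--
-- def _has_w(payload: str, quote_char: Optional[str]) -> bool:
--     """Return True if payload contains a \w (or \\w in double-quoted lines) token anywhere."""
--     i = 0
--     n = len(payload)
--     is_double = (quote_char == '"')
--     while i < n:
--         if not is_double and payload[i] == '\\' and i + 1 < n and payload[i + 1] == 'w':
--             return True
--         if is_double and payload[i] == '\\' and i + 2 < n and payload[i + 1] == '\\' and payload[i + 2] == 'w':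
--             return True
--         i += 1
--     return False
--
-- def _has_w_in_rn_tokens(text: str, quote_char: Optional[str]) -> bool:
--     """Return True if any r:/n:/!r:/!n: payload contains a \w token needing expansion,
--     considering the line's quote style.
--     """
--     i = 0
--     s = text
--     n = len(s)
--
--     def read_until_boundary(k: int) -> Tuple[str, int]:
--         j = k
--         while j < n and not (s.startswith(' && ', j) or s.startswith(' compare ', j)):
--             j += 1
--         return s[k:j], j
--
--     while i < n:
--         if i + 2 < n and s[i] == '!' and s[i + 1] in ('r', 'n') and s[i + 2] == ':':
--             i += 3
--             payload, i = read_until_boundary(i)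
--             if _has_w(payload, quote_char):
--                 return True
--             continue
--         if i + 1 < n and s[i] in ('r', 'n') and s[i + 1] == ':':
--             i += 2
--             payload, i = read_until_boundary(i)
--             if _has_w(payload, quote_char):
--                 return True
--             continue
--         i += 1
--     return False
-- ===== SOURCE B (Python) =====
-- def _has_w_in_rn_tokens(text, quote_char):
--     """Simpler: for each 'r:'/'n:' occurrence, test the marker as a substring of
--     the payload cut at the first boundary, instead of A's skipping state machine."""
--     target = '\\\\w' if quote_char == '"' else '\\w'
--     for i in range(len(text) - 1):
--         if text[i] in 'rn' and text[i + 1] == ':':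
--             rest = text[i + 2:]
--             end = len(rest)
--             for b in (' && ', ' compare '):
--                 p = rest.find(b)
--                 if p != -1 and p < end:
--                     end = p
--             if target in rest[:end]:
--                 return True
--     return False
-- ===== Notes on version B (the rewrite author's own statement) =====
-- stated objective: simpler
-- what changed: A's index state machine (manual boundary scan with startswith plus a char-by-char _has_w loop) is replaced by: for each 'r:'/'n:' occurrence take the payload cut at the first ' && '/' compare ' boundary via str.find and test the precomputed backslash marker with substring containment.
import Mathlib
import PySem

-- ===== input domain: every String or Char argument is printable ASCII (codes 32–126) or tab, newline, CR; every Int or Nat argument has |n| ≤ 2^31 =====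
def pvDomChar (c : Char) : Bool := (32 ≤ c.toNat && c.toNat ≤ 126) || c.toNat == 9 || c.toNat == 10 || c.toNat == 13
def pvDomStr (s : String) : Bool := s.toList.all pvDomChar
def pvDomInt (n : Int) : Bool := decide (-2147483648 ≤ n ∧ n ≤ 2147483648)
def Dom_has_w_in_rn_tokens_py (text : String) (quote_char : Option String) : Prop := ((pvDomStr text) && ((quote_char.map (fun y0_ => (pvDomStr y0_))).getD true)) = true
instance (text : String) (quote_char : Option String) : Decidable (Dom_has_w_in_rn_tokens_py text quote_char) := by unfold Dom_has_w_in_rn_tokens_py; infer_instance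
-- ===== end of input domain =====

-- B replaces A's skipping index state machine (manual startswith boundary scan plus the
-- char-by-char _has_w loop) by, per 'r:'/'n:' occurrence, a find-based payload cut and a
-- substring containment test of the precomputed marker (objective: simpler).

-- ===== PORT A =====

-- s.startswith(' && ', j) or s.startswith(' compare ', j)  (exact: startswith with a
-- nonnegative start offset j is prefix-of-drop)
def pvBndAt (s : List Char) (j : Nat) : Bool :=
  PySem.Chars.startswith (s.drop j) " && ".toList ||
  PySem.Chars.startswith (s.drop j) " compare ".toList

-- the `while j < n and not (...)` loop of read_until_boundary, returning the final j
def pvRub (s : List Char) (n j : Nat) : Nat :=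
  if j < n && !(pvBndAt s j) then pvRub s n (j + 1) else j
termination_by n - j
decreasing_by simp_all; omega

-- cited by pvLoopA's decreasing_by
theorem pvRub_ge (s : List Char) (n j : Nat) : j ≤ pvRub s n j := by
  unfold pvRub
  split
  · exact le_trans (by omega) (pvRub_ge s n (j + 1))
  · exact le_refl j
termination_by n - j
decreasing_by simp_all; omega

-- _has_w's while loop (is_double = quote_char == '"'; the guarded payload[i] accesses are
-- written on payload[i]?, exact since the Python tests each index bound first)
def pvHasW (qc : Option String) (p : List Char) (i : Nat) : Bool :=
  if i < p.length then
    if (!(qc == some "\"")) && (p[i]? == some '\\') && (p[i+1]? == some 'w') then true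
    else if (qc == some "\"") && (p[i]? == some '\\') && (p[i+1]? == some '\\')
            && (p[i+2]? == some 'w') then true
    else pvHasW qc p (i + 1)
  else false
termination_by p.length - i

-- the main while loop of _has_w_in_rn_tokens; the payload slice s[k:j] (0 ≤ k ≤ j) is
-- (s.drop k).take (j - k), with j = read_until_boundary's final index
def pvLoopA (s : List Char) (qc : Option String) (i : Nat) : Bool :=
  if i < s.length then
    if decide (i + 2 < s.length) && (s[i]? == some '!')
        && ((s[i+1]? == some 'r') || (s[i+1]? == some 'n')) && (s[i+2]? == some ':') then
      if pvHasW qc ((s.drop (i + 3)).take (pvRub s s.length (i + 3) - (i + 3))) 0 then true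
      else pvLoopA s qc (pvRub s s.length (i + 3))
    else if decide (i + 1 < s.length) && ((s[i]? == some 'r') || (s[i]? == some 'n'))
        && (s[i+1]? == some ':') then
      if pvHasW qc ((s.drop (i + 2)).take (pvRub s s.length (i + 2) - (i + 2))) 0 then true
      else pvLoopA s qc (pvRub s s.length (i + 2))
    else pvLoopA s qc (i + 1)
  else false
termination_by s.length - i
decreasing_by
  · have := pvRub_ge s s.length (i + 3); omega
  · have := pvRub_ge s s.length (i + 2); omega
  · omega

def has_w_in_rn_tokens_py (text : String) (quote_char : Option String) : Bool :=
  pvLoopA text.toList quote_char 0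

-- ===== PORT B =====

-- end = len(rest); for b in (' && ', ' compare '): p = rest.find(b); if p != -1 and p < end: end = p
def pvEndB (rest : List Char) : Int :=
  [" && ".toList, " compare ".toList].foldl
    (fun e b =>
      if PySem.Chars.find rest b ≠ -1 ∧ PySem.Chars.find rest b < e then PySem.Chars.find rest b
      else e)
    (rest.length : Int)

-- the for-i loop of B over range(len(text) - 1), early return on the first hit;
-- rest[:end] is the slice with Python's clamping rules
def pvLoopB (s : List Char) (tgt : List Char) (i : Nat) : Bool :=
  if i + 1 < s.length then
    if ((s[i]? == some 'r') || (s[i]? == some 'n')) && (s[i+1]? == some ':') then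
      if PySem.Chars.isIn tgt
          (PySem.List.slice (s.drop (i + 2)) none (some (pvEndB (s.drop (i + 2))))) then true
      else pvLoopB s tgt (i + 1)
    else pvLoopB s tgt (i + 1)
  else false
termination_by s.length - i

def has_w_in_rn_tokens_py_alt (text : String) (quote_char : Option String) : Bool :=
  pvLoopB text.toList
    (if quote_char == some "\"" then "\\\\w".toList else "\\w".toList) 0

-- ===== PRECONDITION & SPEC =====
def Spec_has_w_in_rn_tokens_py (text : String) (quote_char : Option String) (out : Bool) : Prop := out = has_w_in_rn_tokens_py_alt text quote_char
instance (text : String) (quote_char : Option String) (out : Bool) : Decidable (Spec_has_w_in_rn_tokens_py text quote_char out) := by unfold Spec_has_w_in_rn_tokens_py; infer_instance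

-- ===== CLAIM (what is proved, stated in full; the proofs are below) =====
def Claim_equal_has_w_in_rn_tokens_py : Prop := ∀ (text : String) (quote_char : Option String), Dom_has_w_in_rn_tokens_py text quote_char → Spec_has_w_in_rn_tokens_py text quote_char (has_w_in_rn_tokens_py text quote_char)

-- ===== LEMMAS AND PROOFS =====

-- the marker B searches for
def pvTgt (qc : Option String) : List Char :=
  if qc == some "\"" then "\\\\w".toList else "\\w".toList

-- a token "r:"/"n:" sits at position p
def pvTok (s : List Char) (p : Nat) : Prop :=
  (s[p]? = some 'r' ∨ s[p]? = some 'n') ∧ s[p+1]? = some ':'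

-- the marker occurs in the payload that starts at p + 2 and is cut at the first boundary
def pvMark (s : List Char) (qc : Option String) (p : Nat) : Prop :=
  pvTgt qc <:+: (s.drop (p + 2)).take (pvRub s s.length (p + 2) - (p + 2))

theorem pvTgt_eq (qc : Option String) :
    pvTgt qc = if qc == some "\"" then ['\\', '\\', 'w'] else ['\\', 'w'] := by
  unfold pvTgt; split <;> rfl

theorem pvTgt_ne_nil (qc : Option String) : pvTgt qc ≠ [] := by
  rw [pvTgt_eq]; split <;> simp

-- ---- pvRub characterisation ----

theorem pvRub_rec (s : List Char) (n j : Nat) (h1 : j < n) (h2 : pvBndAt s j = false) :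
    pvRub s n j = pvRub s n (j + 1) := by
  rw [pvRub]; simp [h1, h2]

theorem pvRub_stop_n (s : List Char) (n j : Nat) (h : n ≤ j) : pvRub s n j = j := by
  rw [pvRub]; simp [show ¬ j < n by omega]

theorem pvRub_stop_bnd (s : List Char) (n j : Nat) (h : pvBndAt s j = true) :
    pvRub s n j = j := by
  rw [pvRub]; simp [h]

theorem pvRub_le (s : List Char) (n j : Nat) (h : j ≤ n) : pvRub s n j ≤ n := by
  by_cases hj : j < n
  · by_cases hb : pvBndAt s j = true
    · rw [pvRub_stop_bnd s n j hb]; omega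
    · rw [pvRub_rec s n j hj (by simpa using hb)]
      exact pvRub_le s n (j + 1) (by omega)
  · rw [pvRub_stop_n s n j (by omega)]; omega
termination_by n - j
decreasing_by omega

theorem pvRub_no_bnd (s : List Char) (n j m : Nat) (h1 : j ≤ m) (h2 : m < pvRub s n j) :
    pvBndAt s m = false := by
  by_cases hj : j < n
  · by_cases hb : pvBndAt s j = true
    · rw [pvRub_stop_bnd s n j hb] at h2; omega
    · have hb' : pvBndAt s j = false := by simpa using hb
      rcases Nat.eq_or_lt_of_le h1 with rfl | hlt
      · exact hb'
      · exact pvRub_no_bnd s n (j + 1) m hlt (by rwa [← pvRub_rec s n j hj hb'])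
  · rw [pvRub_stop_n s n j (by omega)] at h2; omega
termination_by n - j
decreasing_by omega

theorem pvRub_bnd (s : List Char) (n j : Nat) (h : pvRub s n j < n) :
    pvBndAt s (pvRub s n j) = true := by
  by_cases hj : j < n
  · by_cases hb : pvBndAt s j = true
    · rwa [pvRub_stop_bnd s n j hb]
    · have hb' : pvBndAt s j = false := by simpa using hb
      rw [pvRub_rec s n j hj hb'] at h ⊢
      exact pvRub_bnd s n (j + 1) h
  · rw [pvRub_stop_n s n j (by omega)] at h; omega
termination_by n - j
decreasing_by omega

-- anything with the first-boundary property IS pvRub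
theorem pvRub_eq_of (s : List Char) (n j r : Nat) (hjr : j ≤ r) (hrn : r ≤ n)
    (hno : ∀ m, j ≤ m → m < r → pvBndAt s m = false)
    (hend : r < n → pvBndAt s r = true) : pvRub s n j = r := by
  have h1 : r ≤ pvRub s n j := by
    by_contra h
    push_neg at h
    have hb := pvRub_bnd s n j (by omega)
    have := hno _ (pvRub_ge s n j) h
    simp_all
  have h2 : pvRub s n j ≤ r := by
    by_contra h
    push_neg at h
    have hb := hend (by have := pvRub_le s n j (by omega); omega)
    have := pvRub_no_bnd s n j r hjr h
    simp_all
  omega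

-- a boundary starts with a space
theorem pvBndAt_space (s : List Char) (m : Nat) (h : pvBndAt s m = true) :
    s[m]? = some ' ' := by
  unfold pvBndAt at h
  rw [Bool.or_eq_true, PySem.Chars.startswith_iff, PySem.Chars.startswith_iff] at h
  have h0 : (s.drop m)[0]? = some ' ' := by
    rcases h with ⟨t, ht⟩ | ⟨t, ht⟩ <;> rw [← ht] <;> rfl
  simpa [List.getElem?_drop] using h0

-- ---- pvHasW ↔ marker infix ----

theorem tgt_prefix_iff (qc : Option String) (l : List Char) :
    pvTgt qc <+: l ↔
      (if qc == some "\"" then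
        l[0]? = some '\\' ∧ l[1]? = some '\\' ∧ l[2]? = some 'w'
      else l[0]? = some '\\' ∧ l[1]? = some 'w') := by
  rw [pvTgt_eq]
  by_cases hq : (qc == some "\"") = true
  · simp only [hq, if_true]
    constructor
    · rintro ⟨t, ht⟩
      rw [← ht]
      exact ⟨rfl, rfl, rfl⟩
    · rintro ⟨h0, h1, h2⟩
      obtain _ | ⟨a, _ | ⟨b, _ | ⟨c, t⟩⟩⟩ := l
      · simp at h0
      · simp at h1
      · simp at h2
      · simp only [List.getElem?_cons_zero, List.getElem?_cons_succ,
          Option.some.injEq] at h0 h1 h2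
        subst h0; subst h1; subst h2
        exact ⟨t, rfl⟩
  · simp only [hq, if_false]
    constructor
    · rintro ⟨t, ht⟩
      rw [← ht]
      exact ⟨rfl, rfl⟩
    · rintro ⟨h0, h1⟩
      obtain _ | ⟨a, _ | ⟨b, t⟩⟩ := l
      · simp at h0
      · simp at h1
      · simp only [List.getElem?_cons_zero, List.getElem?_cons_succ,
          Option.some.injEq] at h0 h1
        subst h0; subst h1
        exact ⟨t, rfl⟩

theorem pvHasW_iff (qc : Option String) (p : List Char) (i : Nat) :
    pvHasW qc p i = true ↔ ∃ m, i ≤ m ∧ pvTgt qc <+: p.drop m := by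
  rw [pvHasW]
  by_cases hi : i < p.length
  · simp only [hi, if_true]
    constructor
    · intro h
      split at h
      · rename_i hcond
        simp only [Bool.and_eq_true, Bool.not_eq_true', beq_iff_eq] at hcond
        refine ⟨i, le_refl _, ?_⟩
        rw [tgt_prefix_iff]
        simp [hcond.1.1, List.getElem?_drop, hcond.1.2, hcond.2]
      · split at h
        · rename_i hcond
          simp only [Bool.and_eq_true, beq_iff_eq] at hcond
          refine ⟨i, le_refl _, ?_⟩
          rw [tgt_prefix_iff]
          simp [hcond.1.1.1, hcond.1.1.2, hcond.1.2, hcond.2, List.getElem?_drop]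
        · rcases (pvHasW_iff qc p (i + 1)).1 h with ⟨m, hm, hpre⟩
          exact ⟨m, by omega, hpre⟩
    · rintro ⟨m, hm, hpre⟩
      rcases Nat.eq_or_lt_of_le hm with rfl | hlt
      · rw [tgt_prefix_iff] at hpre
        by_cases hq : (qc == some "\"") = true
        · rw [if_pos hq] at hpre
          have e0 : p[i]? = some '\\' := by simpa [List.getElem?_drop] using hpre.1
          have e1 : p[i+1]? = some '\\' := by simpa [List.getElem?_drop] using hpre.2.1
          have e2 : p[i+2]? = some 'w' := by simpa [List.getElem?_drop] using hpre.2.2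
          rw [if_neg (by simp [hq]), if_pos (by simp [hq, e0, e1, e2])]
        · have hq' : (qc == some "\"") = false := by simpa using hq
          rw [if_neg (by simp [hq'])] at hpre
          have e0 : p[i]? = some '\\' := by simpa [List.getElem?_drop] using hpre.1
          have e1 : p[i+1]? = some 'w' := by simpa [List.getElem?_drop] using hpre.2
          rw [if_pos (by simp [hq', e0, e1])]
      · have hrec := (pvHasW_iff qc p (i + 1)).2 ⟨m, by omega, hpre⟩
        split
        · rfl
        · split
          · rfl
          · exact hrec
  · simp only [hi, if_false]
    constructor
    · intro h; simp at h
    · rintro ⟨m, hm, hpre⟩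
      exfalso
      rw [List.drop_eq_nil_of_le (by omega), List.prefix_nil] at hpre
      exact pvTgt_ne_nil qc hpre
termination_by p.length - i
decreasing_by all_goals omega

theorem pvHasW_infix (qc : Option String) (p : List Char) :
    pvHasW qc p 0 = true ↔ pvTgt qc <:+: p := by
  rw [pvHasW_iff]
  constructor
  · rintro ⟨m, _, hpre⟩
    exact hpre.isInfix.trans (List.drop_suffix m p).isInfix
  · intro h
    rcases (PySem.Chars.exists_prefix_drop_iff_isIn (pvTgt qc) p).2
      ((PySem.Chars.isIn_iff_infix (pvTgt qc) p).2 h) with ⟨j, hj⟩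
    exact ⟨j, Nat.zero_le _, hj⟩

-- ---- a marked token inside a payload marks the enclosing payload ----

theorem pvMark_of_inner (s : List Char) (qc : Option String) (k p : Nat)
    (hk : k ≤ s.length) (hkp : k ≤ p) (hpj : p < pvRub s s.length k)
    (htok : pvTok s p) (hm : pvMark s qc p) :
    pvTgt qc <:+: (s.drop k).take (pvRub s s.length k - k) := by
  unfold pvMark at hm
  obtain ⟨hp1, -⟩ := List.getElem?_eq_some_iff.mp htok.2
  have hjn : pvRub s s.length k ≤ s.length := pvRub_le s s.length k hk
  have hp2j : p + 2 ≤ pvRub s s.length k := by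
    by_contra hc
    push_neg at hc
    have hjp : pvRub s s.length k = p + 1 := by omega
    have hjn' : pvRub s s.length k < s.length := by omega
    have hsp := pvBndAt_space s _ (pvRub_bnd s s.length k hjn')
    rw [hjp, htok.2] at hsp
    simp at hsp
  have hrub : pvRub s s.length (p + 2) = pvRub s s.length k := by
    apply pvRub_eq_of s s.length (p + 2) _ hp2j hjn
    · intro m hm1 hm2
      exact pvRub_no_bnd s s.length k m (by omega) hm2
    · exact fun h => pvRub_bnd s s.length k h
  rw [hrub] at hm
  have e2 : k + (p + 2 - k) = p + 2 := by omega
  have hPL : (s.drop (p + 2)).take (pvRub s s.length k - (p + 2)) =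
      ((s.drop k).take (pvRub s s.length k - k)).drop (p + 2 - k) := by
    rw [List.drop_take, List.drop_drop, e2]
    congr 1
    omega
  rw [hPL] at hm
  exact hm.trans (List.drop_suffix _ _).isInfix

-- ---- A-side characterisation ----

theorem pvLoopA_iff (s : List Char) (qc : Option String) (i : Nat) :
    pvLoopA s qc i = true ↔ ∃ p, i ≤ p ∧ pvTok s p ∧ pvMark s qc p := by
  rw [pvLoopA]
  by_cases hi : i < s.length
  · rw [if_pos hi]
    by_cases h1 : (decide (i + 2 < s.length) && (s[i]? == some '!')
        && ((s[i+1]? == some 'r') || (s[i+1]? == some 'n')) && (s[i+2]? == some ':')) = true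
    · rw [if_pos h1]
      simp only [Bool.and_eq_true, Bool.or_eq_true, beq_iff_eq, decide_eq_true_eq] at h1
      obtain ⟨⟨⟨hlt, hbang⟩, hrn⟩, hcol⟩ := h1
      have htok1 : pvTok s (i + 1) := ⟨hrn, hcol⟩
      by_cases hW : pvHasW qc ((s.drop (i + 3)).take (pvRub s s.length (i + 3) - (i + 3))) 0 = true
      · rw [if_pos hW]
        simp only [true_iff]
        exact ⟨i + 1, by omega, htok1, (pvHasW_infix qc _).1 hW⟩
      · rw [if_neg hW, pvLoopA_iff s qc (pvRub s s.length (i + 3))]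
        constructor
        · rintro ⟨p, hp, ht, hm⟩
          exact ⟨p, le_trans (le_trans (by omega) (pvRub_ge s s.length (i + 3))) hp, ht, hm⟩
        · rintro ⟨p, hp, ht, hm⟩
          refine ⟨p, ?_, ht, hm⟩
          by_contra hpj
          push_neg at hpj
          have hcase : p = i ∨ p = i + 1 ∨ p = i + 2 ∨ i + 3 ≤ p := by omega
          rcases hcase with rfl | rfl | rfl | hge
          · rcases ht.1 with h | h <;> rw [hbang] at h <;> simp at h
          · exact hW ((pvHasW_infix qc _).2 hm)
          · rcases ht.1 with h | h <;> rw [hcol] at h <;> simp at h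
          · exact hW ((pvHasW_infix qc _).2
              (pvMark_of_inner s qc (i + 3) p (by omega) hge hpj ht hm))
    · rw [if_neg h1]
      by_cases h2 : (decide (i + 1 < s.length) && ((s[i]? == some 'r') || (s[i]? == some 'n'))
          && (s[i+1]? == some ':')) = true
      · rw [if_pos h2]
        simp only [Bool.and_eq_true, Bool.or_eq_true, beq_iff_eq, decide_eq_true_eq] at h2
        obtain ⟨⟨hlt, hrn⟩, hcol⟩ := h2
        have htok0 : pvTok s i := ⟨hrn, hcol⟩
        by_cases hW : pvHasW qc ((s.drop (i + 2)).take (pvRub s s.length (i + 2) - (i + 2))) 0 = true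
        · rw [if_pos hW]
          simp only [true_iff]
          exact ⟨i, le_refl _, htok0, (pvHasW_infix qc _).1 hW⟩
        · rw [if_neg hW, pvLoopA_iff s qc (pvRub s s.length (i + 2))]
          constructor
          · rintro ⟨p, hp, ht, hm⟩
            exact ⟨p, le_trans (le_trans (by omega) (pvRub_ge s s.length (i + 2))) hp, ht, hm⟩
          · rintro ⟨p, hp, ht, hm⟩
            refine ⟨p, ?_, ht, hm⟩
            by_contra hpj
            push_neg at hpj
            have hcase : p = i ∨ p = i + 1 ∨ i + 2 ≤ p := by omega
            rcases hcase with rfl | rfl | hge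
            · exact hW ((pvHasW_infix qc _).2 hm)
            · rcases ht.1 with h | h <;> rw [hcol] at h <;> simp at h
            · exact hW ((pvHasW_infix qc _).2
                (pvMark_of_inner s qc (i + 2) p (by omega) hge hpj ht hm))
      · rw [if_neg h2, pvLoopA_iff s qc (i + 1)]
        constructor
        · rintro ⟨p, hp, ht, hm⟩
          exact ⟨p, by omega, ht, hm⟩
        · rintro ⟨p, hp, ht, hm⟩
          rcases Nat.eq_or_lt_of_le hp with rfl | h
          · exfalso
            apply h2
            obtain ⟨hlt1, hcol⟩ := List.getElem?_eq_some_iff.mp ht.2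
            rcases ht.1 with h | h <;>
              simp [h, hcol, hlt1]
          · exact ⟨p, h, ht, hm⟩
  · rw [if_neg hi]
    constructor
    · intro h; simp at h
    · rintro ⟨p, hp, ht, hm⟩
      obtain ⟨hlt, -⟩ := List.getElem?_eq_some_iff.mp ht.2
      exact absurd hlt (by omega)
termination_by s.length - i
decreasing_by
  · have := pvRub_ge s s.length (i + 3); omega
  · have := pvRub_ge s s.length (i + 2); omega
  · omega

-- ---- B-side: the fold computing `end` finds the first boundary ----

theorem prefix_pos_lt (b rest : List Char) (m : Nat) (hb : b ≠ []) (h : b <+: rest.drop m) :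
    m < rest.length := by
  by_contra hc
  push_neg at hc
  rw [List.drop_eq_nil_of_le hc, List.prefix_nil] at h
  exact hb h

theorem pvFind_cases (rest b : List Char) (hb : b ≠ []) :
    (PySem.Chars.find rest b = -1 ∧ ∀ m : Nat, ¬ b <+: rest.drop m) ∨
    (0 ≤ PySem.Chars.find rest b ∧ (PySem.Chars.find rest b).toNat < rest.length ∧
      b <+: rest.drop (PySem.Chars.find rest b).toNat ∧
      ∀ m : Nat, m < (PySem.Chars.find rest b).toNat → ¬ b <+: rest.drop m) := by
  by_cases h : PySem.Chars.find rest b = -1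
  · left
    refine ⟨h, fun m hm => ?_⟩
    rw [PySem.Chars.find_eq_neg_one_iff] at h
    exact h ((PySem.Chars.isIn_iff_infix b rest).1
      ((PySem.Chars.exists_prefix_drop_iff_isIn b rest).1 ⟨m, hm⟩))
  · right
    have h0 : 0 ≤ PySem.Chars.find rest b := by
      have := PySem.Chars.neg_one_le_find rest b; omega
    obtain ⟨hpre, hmin⟩ := PySem.Chars.find_spec h0
    exact ⟨h0, prefix_pos_lt b rest _ hb hpre, hpre, hmin⟩

theorem pvEndB_unfold (rest : List Char) :
    pvEndB rest =
      (if PySem.Chars.find rest (" compare ".toList) ≠ -1 ∧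
          PySem.Chars.find rest (" compare ".toList) <
            (if PySem.Chars.find rest (" && ".toList) ≠ -1 ∧
                PySem.Chars.find rest (" && ".toList) < (rest.length : Int) then
              PySem.Chars.find rest (" && ".toList)
            else (rest.length : Int)) then
        PySem.Chars.find rest (" compare ".toList)
      else
        (if PySem.Chars.find rest (" && ".toList) ≠ -1 ∧
            PySem.Chars.find rest (" && ".toList) < (rest.length : Int) then
          PySem.Chars.find rest (" && ".toList)
        else (rest.length : Int))) := rfl

theorem pvEndB_spec (rest : List Char) :
    0 ≤ pvEndB rest ∧ (pvEndB rest).toNat ≤ rest.length ∧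
    (∀ m : Nat, m < (pvEndB rest).toNat →
      ¬(" && ".toList <+: rest.drop m ∨ " compare ".toList <+: rest.drop m)) ∧
    ((pvEndB rest).toNat < rest.length →
      (" && ".toList <+: rest.drop (pvEndB rest).toNat ∨
        " compare ".toList <+: rest.drop (pvEndB rest).toNat)) := by
  rw [pvEndB_unfold]
  rcases pvFind_cases rest (" && ".toList) (by decide) with ⟨h1, hno1⟩ | ⟨h1a, h1b, h1c, h1d⟩
  · have hinner : (if PySem.Chars.find rest (" && ".toList) ≠ -1 ∧
        PySem.Chars.find rest (" && ".toList) < (rest.length : Int) then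
          PySem.Chars.find rest (" && ".toList)
        else (rest.length : Int)) = (rest.length : Int) := by
      rw [if_neg]; rintro ⟨hne, -⟩; exact hne h1
    rw [hinner]
    rcases pvFind_cases rest (" compare ".toList) (by decide) with ⟨h2, hno2⟩ | ⟨h2a, h2b, h2c, h2d⟩
    · rw [if_neg (by rintro ⟨hne, -⟩; exact hne h2)]
      refine ⟨by positivity, by simp, ?_, ?_⟩
      · intro m hm
        rintro (h | h)
        · exact hno1 m h
        · exact hno2 m h
      · intro h; simp at h
    · rw [if_pos ⟨by omega, by omega⟩]
      refine ⟨h2a, by omega, ?_, fun _ => Or.inr h2c⟩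
      intro m hm
      rintro (h | h)
      · exact hno1 m h
      · exact h2d m hm h
  · have hinner : (if PySem.Chars.find rest (" && ".toList) ≠ -1 ∧
        PySem.Chars.find rest (" && ".toList) < (rest.length : Int) then
          PySem.Chars.find rest (" && ".toList)
        else (rest.length : Int)) = PySem.Chars.find rest (" && ".toList) := by
      rw [if_pos ⟨by omega, by omega⟩]
    rw [hinner]
    rcases pvFind_cases rest (" compare ".toList) (by decide) with ⟨h2, hno2⟩ | ⟨h2a, h2b, h2c, h2d⟩
    · rw [if_neg (by rintro ⟨hne, -⟩; exact hne h2)]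
      refine ⟨h1a, by omega, ?_, fun _ => Or.inl h1c⟩
      intro m hm
      rintro (h | h)
      · exact h1d m hm h
      · exact hno2 m h
    · by_cases hc2 : PySem.Chars.find rest (" compare ".toList) ≠ -1 ∧
        PySem.Chars.find rest (" compare ".toList) < PySem.Chars.find rest (" && ".toList)
      · rw [if_pos hc2]
        refine ⟨h2a, by omega, ?_, fun _ => Or.inr h2c⟩
        intro m hm
        rintro (h | h)
        · exact h1d m (by omega) h
        · exact h2d m hm h
      · rw [if_neg hc2]
        refine ⟨h1a, by omega, ?_, fun _ => Or.inl h1c⟩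
        intro m hm
        rintro (h | h)
        · exact h1d m hm h
        · exact h2d m (by omega) h

theorem pvEndB_eq (s : List Char) (k : Nat) (hk : k ≤ s.length) :
    pvEndB (s.drop k) = ((pvRub s s.length k - k : Nat) : Int) := by
  obtain ⟨he0, heL, heno, heyes⟩ := pvEndB_spec (s.drop k)
  have hlen : (s.drop k).length = s.length - k := List.length_drop
  have hjk := pvRub_ge s s.length k
  have hjn := pvRub_le s s.length k hk
  have hbnd : ∀ m : Nat, pvBndAt s (k + m) = true ↔
      (" && ".toList <+: (s.drop k).drop m ∨ " compare ".toList <+: (s.drop k).drop m) := by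
    intro m
    unfold pvBndAt
    rw [List.drop_drop, Bool.or_eq_true, PySem.Chars.startswith_iff, PySem.Chars.startswith_iff]
  have htn : (pvEndB (s.drop k)).toNat = pvRub s s.length k - k := by
    by_contra hne
    rcases Nat.lt_or_ge (pvEndB (s.drop k)).toNat (pvRub s s.length k - k) with h | h
    · have hPe := heyes (by omega)
      have hno := pvRub_no_bnd s s.length k (k + (pvEndB (s.drop k)).toNat) (by omega) (by omega)
      rw [(hbnd _).2 hPe] at hno
      simp at hno
    · have hjlt : pvRub s s.length k < s.length := by omega
      have hb := pvRub_bnd s s.length k hjlt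
      have hP := (hbnd (pvRub s s.length k - k)).1
        (by rw [show k + (pvRub s s.length k - k) = pvRub s s.length k by omega]; exact hb)
      exact heno _ (by omega) hP
  omega

theorem pvMark_iff_isIn (s : List Char) (qc : Option String) (i : Nat) (h : i + 2 ≤ s.length) :
    PySem.Chars.isIn (pvTgt qc)
      (PySem.List.slice (s.drop (i + 2)) none (some (pvEndB (s.drop (i + 2))))) = true ↔
    pvMark s qc i := by
  rw [pvEndB_eq s (i + 2) h, PySem.List.slice_to_natCast, PySem.Chars.isIn_iff_infix]
  exact Iff.rfl

theorem pvLoopB_iff (s : List Char) (qc : Option String) (i : Nat) :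
    pvLoopB s (pvTgt qc) i = true ↔ ∃ p, i ≤ p ∧ pvTok s p ∧ pvMark s qc p := by
  rw [pvLoopB]
  by_cases hi : i + 1 < s.length
  · rw [if_pos hi]
    by_cases ht : (((s[i]? == some 'r') || (s[i]? == some 'n')) && (s[i+1]? == some ':')) = true
    · rw [if_pos ht]
      simp only [Bool.and_eq_true, Bool.or_eq_true, beq_iff_eq] at ht
      have htok : pvTok s i := ⟨ht.1, ht.2⟩
      by_cases hIn : PySem.Chars.isIn (pvTgt qc)
          (PySem.List.slice (s.drop (i + 2)) none (some (pvEndB (s.drop (i + 2))))) = true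
      · rw [if_pos hIn]
        simp only [true_iff]
        exact ⟨i, le_refl _, htok, (pvMark_iff_isIn s qc i (by omega)).1 hIn⟩
      · rw [if_neg hIn, pvLoopB_iff s qc (i + 1)]
        constructor
        · rintro ⟨p, hp, ht', hm⟩
          exact ⟨p, by omega, ht', hm⟩
        · rintro ⟨p, hp, ht', hm⟩
          rcases Nat.eq_or_lt_of_le hp with rfl | hlt
          · exact absurd ((pvMark_iff_isIn s qc i (by omega)).2 hm) hIn
          · exact ⟨p, hlt, ht', hm⟩
    · rw [if_neg ht, pvLoopB_iff s qc (i + 1)]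
      constructor
      · rintro ⟨p, hp, ht', hm⟩
        exact ⟨p, by omega, ht', hm⟩
      · rintro ⟨p, hp, ht', hm⟩
        rcases Nat.eq_or_lt_of_le hp with rfl | hlt
        · exfalso
          apply ht
          rcases ht'.1 with h | h <;> simp [h, ht'.2]
        · exact ⟨p, hlt, ht', hm⟩
  · rw [if_neg hi]
    constructor
    · intro h; simp at h
    · rintro ⟨p, hp, ht', hm⟩
      obtain ⟨hlt, -⟩ := List.getElem?_eq_some_iff.mp ht'.2
      exact absurd hlt (by omega)
termination_by s.length - i
decreasing_by all_goals omega

-- ===== VERDICT (by name: the statement is the Claim_ definition above) =====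
theorem has_w_in_rn_tokens_py_spec : Claim_equal_has_w_in_rn_tokens_py := by
  intro text qc _
  show has_w_in_rn_tokens_py text qc = has_w_in_rn_tokens_py_alt text qc
  exact Bool.eq_iff_iff.mpr
    ((pvLoopA_iff text.toList qc 0).trans (pvLoopB_iff text.toList qc 0).symm)
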